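-- pv_equiv track=rewrite | github.com/largesd/largesd | backend/scoring_engine.py | _rebuttal_type_distribution
-- ===== SOURCE A (Python) =====
-- from typing import Any, Dict, List, Optional, Tuple
--
-- def _rebuttal_type_distribution(own_arguments: List[Dict], opposing_arguments: List[Dict]) -> Dict[str, int]:
--     """
--     DEPRECATED: Fallback heuristic when actual judge tags are unavailable.
--     LSD v1.2 uses actual judge_coverage rebuttal_type tags instead.
--     Kept for backward compatibility in tests only.
--     """
--     if not opposing_arguments:
--         return {"EMPIRICAL": 0, "NORMATIVE": 0, "INFERENCE": 0, "SCOPE/DEFINITION": 0}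
--     joined = " ".join(arg.get("inference_text", "") for arg in own_arguments).lower()
--     distribution = {"EMPIRICAL": 0, "NORMATIVE": 0, "INFERENCE": 0, "SCOPE/DEFINITION": 0}
--     if any(word in joined for word in ("data", "study", "evidence", "measured")):
--         distribution["EMPIRICAL"] += len(opposing_arguments)
--     elif any(word in joined for word in ("fair", "should", "ought", "value")):
--         distribution["NORMATIVE"] += len(opposing_arguments)
--     elif any(word in joined for word in ("because", "therefore", "implies")):
--         distribution["INFERENCE"] += len(opposing_arguments)
--     else:
--         distribution["SCOPE/DEFINITION"] += len(opposing_arguments)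
--     return distribution
-- ===== SOURCE B (Python) =====
-- from typing import Dict, List
--
-- # Priority-ordered keyword groups: lower number = higher priority.
-- _KEYWORD_GROUPS = [
--     (0, ("data", "study", "evidence", "measured")),
--     (1, ("fair", "should", "ought", "value")),
--     (2, ("because", "therefore", "implies")),
-- ]
-- _CATEGORIES = ("EMPIRICAL", "NORMATIVE", "INFERENCE", "SCOPE/DEFINITION")
--
-- def _rebuttal_type_distribution(own_arguments: List[Dict], opposing_arguments: List[Dict]) -> Dict[str, int]:
--     # No joined string: since no keyword contains a space, a keyword occurs in the
--     # space-joined text iff it occurs in some single argument's text.  Scan each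
--     # argument's lowered text and keep the best (minimum) matched priority.
--     if not opposing_arguments:
--         return {c: 0 for c in _CATEGORIES}
--     best = 3  # SCOPE/DEFINITION
--     for arg in own_arguments:
--         text = arg.get("inference_text", "").lower()
--         for pri, kws in _KEYWORD_GROUPS:
--             if pri < best and any(kw in text for kw in kws):
--                 best = pri
--     dist = {c: 0 for c in _CATEGORIES}
--     dist[_CATEGORIES[best]] = len(opposing_arguments)
--     return dist
-- ===== Notes on version B (the rewrite author's own statement) =====
-- stated objective: alternative
-- what changed: B never builds the joined string: since no keyword contains a space, a keyword occurs in the space-joined text iff it occurs in some single argument's text, so B scans each argument's lowered text separately and folds a minimum-priority accumulator over the arguments, then writes len(opposing_arguments) into the category of that minimal priority.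
import Mathlib
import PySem

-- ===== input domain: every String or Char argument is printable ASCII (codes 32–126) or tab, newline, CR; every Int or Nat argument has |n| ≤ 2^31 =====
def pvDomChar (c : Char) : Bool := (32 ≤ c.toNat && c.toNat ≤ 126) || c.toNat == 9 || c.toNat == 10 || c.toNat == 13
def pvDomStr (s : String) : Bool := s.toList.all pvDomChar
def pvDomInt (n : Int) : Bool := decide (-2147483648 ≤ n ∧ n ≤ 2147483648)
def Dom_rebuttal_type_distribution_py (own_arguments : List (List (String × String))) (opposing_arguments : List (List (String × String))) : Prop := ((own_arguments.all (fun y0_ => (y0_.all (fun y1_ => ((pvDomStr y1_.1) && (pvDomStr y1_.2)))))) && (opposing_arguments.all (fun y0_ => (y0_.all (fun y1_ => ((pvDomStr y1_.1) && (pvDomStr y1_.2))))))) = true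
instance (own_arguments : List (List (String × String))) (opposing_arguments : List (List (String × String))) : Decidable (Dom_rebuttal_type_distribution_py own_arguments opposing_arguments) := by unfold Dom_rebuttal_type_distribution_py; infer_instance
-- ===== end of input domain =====

-- B never builds the joined string: it scans each argument's lowered text separately and folds a min-priority accumulator (alternative decomposition, same cost; return-value equivalence).


-- ===== PORT A =====
def rebuttal_type_distribution_py (own_arguments : List (List (String × String))) (opposing_arguments : List (List (String × String))) : List (String × Int) :=
  if opposing_arguments.isEmpty then
    [("EMPIRICAL", 0), ("NORMATIVE", 0), ("INFERENCE", 0), ("SCOPE/DEFINITION", 0)]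
  else
    let joined := PySem.Str.lower (PySem.Str.join " "
      (own_arguments.map (fun arg => (PySem.Dict.mk arg).getD "inference_text" "")))
    let distribution : PySem.Dict String Int :=
      PySem.Dict.mk [("EMPIRICAL", 0), ("NORMATIVE", 0), ("INFERENCE", 0), ("SCOPE/DEFINITION", 0)]
    let distribution :=
      if (["data", "study", "evidence", "measured"] : List String).any (fun w => PySem.Str.isIn w joined) then
        distribution.insert "EMPIRICAL" (distribution.getD "EMPIRICAL" 0 + (opposing_arguments.length : Int))
      else if (["fair", "should", "ought", "value"] : List String).any (fun w => PySem.Str.isIn w joined) then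
        distribution.insert "NORMATIVE" (distribution.getD "NORMATIVE" 0 + (opposing_arguments.length : Int))
      else if (["because", "therefore", "implies"] : List String).any (fun w => PySem.Str.isIn w joined) then
        distribution.insert "INFERENCE" (distribution.getD "INFERENCE" 0 + (opposing_arguments.length : Int))
      else
        distribution.insert "SCOPE/DEFINITION" (distribution.getD "SCOPE/DEFINITION" 0 + (opposing_arguments.length : Int))
    distribution.items

-- ===== PORT B =====
-- B: no joined string; per-argument scan with a minimum-priority accumulator.
def pvKeywordGroups : List (Int × List String) :=
  [(0, ["data", "study", "evidence", "measured"]),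
   (1, ["fair", "should", "ought", "value"]),
   (2, ["because", "therefore", "implies"])]

def pvCategories : List String := ["EMPIRICAL", "NORMATIVE", "INFERENCE", "SCOPE/DEFINITION"]

def rebuttal_type_distribution_py_alt (own_arguments : List (List (String × String))) (opposing_arguments : List (List (String × String))) : List (String × Int) :=
  if opposing_arguments.isEmpty then
    pvCategories.map (fun c => (c, (0 : Int)))
  else
    let best : Int := own_arguments.foldl (fun best arg =>
      let text := PySem.Str.lower ((PySem.Dict.mk arg).getD "inference_text" "")
      pvKeywordGroups.foldl (fun b p =>
        if p.1 < b && p.2.any (fun kw => PySem.Str.isIn kw text) then p.1 else b) best) 3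
    let dist := PySem.Dict.mk (pvCategories.map (fun c => (c, (0 : Int))))
    -- _CATEGORIES[best]: best is always in range 0..3; Python indexing ported via pyGet?
    let dist := dist.insert ((PySem.List.pyGet? pvCategories best).getD "") (opposing_arguments.length : Int)
    dist.items

-- ===== PRECONDITION & SPEC =====
def Spec_rebuttal_type_distribution_py (own_arguments : List (List (String × String))) (opposing_arguments : List (List (String × String))) (out : List (String × Int)) : Prop := out = rebuttal_type_distribution_py_alt own_arguments opposing_arguments
instance (own_arguments : List (List (String × String))) (opposing_arguments : List (List (String × String))) (out : List (String × Int)) : Decidable (Spec_rebuttal_type_distribution_py own_arguments opposing_arguments out) := by unfold Spec_rebuttal_type_distribution_py; infer_instance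

-- ===== CLAIM =====
def Claim_equal_rebuttal_type_distribution_py : Prop := ∀ (own_arguments : List (List (String × String))) (opposing_arguments : List (List (String × String))), Dom_rebuttal_type_distribution_py own_arguments opposing_arguments → Spec_rebuttal_type_distribution_py own_arguments opposing_arguments (rebuttal_type_distribution_py own_arguments opposing_arguments)

-- ===== LEMMAS AND PROOFS =====

-- A list without c is a prefix of l₁ ++ c :: l₂ only through l₁.
lemma pv_prefix_append_cons {α} (c : α) (sub l₁ l₂ : List α) (hc : c ∉ sub)
    (h : sub <+: l₁ ++ c :: l₂) : sub <+: l₁ := by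
  induction sub generalizing l₁ with
  | nil => exact List.nil_prefix
  | cons x s ih =>
    cases l₁ with
    | nil =>
      rcases h with ⟨t, ht⟩
      simp at ht
      exact absurd (ht.1 ▸ List.mem_cons_self) hc
    | cons a l₁' =>
      rcases List.cons_prefix_cons.mp h with ⟨rfl, h'⟩
      exact List.cons_prefix_cons.mpr ⟨rfl, ih l₁' (fun hm => hc (List.mem_cons_of_mem _ hm)) h'⟩

-- A list without c is an infix of l₁ ++ c :: l₂ iff it is an infix of l₁ or of l₂.
lemma pv_infix_append_cons {α} (c : α) (sub l₁ l₂ : List α) (hc : c ∉ sub) :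
    sub <:+: l₁ ++ c :: l₂ ↔ sub <:+: l₁ ∨ sub <:+: l₂ := by
  constructor
  · intro h
    induction l₁ with
    | nil =>
      simp only [List.nil_append] at h
      rcases List.infix_cons_iff.mp h with h | h
      · cases sub with
        | nil => exact Or.inl List.nil_infix
        | cons x s =>
          rcases List.cons_prefix_cons.mp h with ⟨rfl, -⟩
          exact absurd List.mem_cons_self hc
      · exact Or.inr h
    | cons a l₁' ih =>
      rcases List.infix_cons_iff.mp h with h | h
      · exact Or.inl (pv_prefix_append_cons c sub (a :: l₁') l₂ hc h).isInfix
      · rcases ih h with h' | h'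
        · exact Or.inl (List.infix_cons h')
        · exact Or.inr h'
  · rintro (h | h)
    · exact h.trans ⟨[], c :: l₂, by simp⟩
    · exact h.trans ⟨l₁ ++ [c], [], by simp⟩

-- A space-free nonempty list is an infix of the space-join iff it is an infix of some part.
lemma pv_infix_join (sub : List Char) (hsp : ' ' ∉ sub) (hne : sub ≠ []) (parts : List (List Char)) :
    sub <:+: PySem.Chars.join [' '] parts ↔ ∃ p ∈ parts, sub <:+: p := by
  induction parts with
  | nil =>
    simp [PySem.Chars.join_nil, List.infix_nil, hne]
  | cons p rest ih =>
    cases rest with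
    | nil => simp [PySem.Chars.join_singleton]
    | cons q r =>
      rw [PySem.Chars.join_cons_cons]
      have : p ++ [' '] ++ PySem.Chars.join [' '] (q :: r)
           = p ++ ' ' :: PySem.Chars.join [' '] (q :: r) := by simp
      rw [this, pv_infix_append_cons ' ' sub p _ hsp, ih]
      simp

-- lower distributes over the space-join.
lemma pv_lower_join (parts : List (List Char)) :
    PySem.Chars.lower (PySem.Chars.join [' '] parts)
      = PySem.Chars.join [' '] (parts.map PySem.Chars.lower) := by
  induction parts with
  | nil => simp [PySem.Chars.join_nil, PySem.Chars.lower]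
  | cons p rest ih =>
    cases rest with
    | nil => simp [PySem.Chars.join_singleton]
    | cons q r =>
      simp only [List.map_cons] at ih ⊢
      rw [PySem.Chars.join_cons_cons, PySem.Chars.join_cons_cons, ← ih]
      simp only [PySem.Chars.lower, List.map_append]
      norm_num [PySem.Chars.lowerChar]
      intro h
      exact absurd h (by decide)

-- keyword occurrence in the lowered join = occurrence in some lowered text.
lemma pv_isIn_join (w : String) (hsp : ' ' ∉ w.toList) (hne : w.toList ≠ []) (texts : List String) :
    PySem.Str.isIn w (PySem.Str.lower (PySem.Str.join " " texts))
      = texts.any (fun t => PySem.Str.isIn w (PySem.Str.lower t)) := by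
  have hsep : (" " : String).toList = [' '] := rfl
  rcases h : texts.any (fun t => PySem.Str.isIn w (PySem.Str.lower t)) with _ | _
  · rw [Bool.eq_false_iff]
    intro hin
    rw [PySem.Str.isIn_iff_infix, PySem.Str.toList_lower, PySem.Str.toList_join, hsep,
        pv_lower_join, pv_infix_join w.toList hsp hne] at hin
    rcases hin with ⟨p, hp, hinf⟩
    simp only [List.map_map, List.mem_map] at hp
    rcases hp with ⟨t, ht, rfl⟩
    rw [List.any_eq_false] at h
    exact (h t ht) (by rw [PySem.Str.isIn_iff_infix, PySem.Str.toList_lower]; simpa using hinf)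
  · rw [List.any_eq_true] at h
    rcases h with ⟨t, ht, hin⟩
    rw [PySem.Str.isIn_iff_infix, PySem.Str.toList_lower] at hin
    rw [PySem.Str.isIn_iff_infix, PySem.Str.toList_lower, PySem.Str.toList_join, hsep,
        pv_lower_join, pv_infix_join w.toList hsp hne]
    exact ⟨PySem.Chars.lower t.toList, by
      simp only [List.map_map, List.mem_map]; exact ⟨t, ht, rfl⟩, hin⟩

-- the priority of a single (already lowered) text
def pvPri (text : String) : Int :=
  if (["data", "study", "evidence", "measured"] : List String).any (fun w => PySem.Str.isIn w text) then 0
  else if (["fair", "should", "ought", "value"] : List String).any (fun w => PySem.Str.isIn w text) then 1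
  else if (["because", "therefore", "implies"] : List String).any (fun w => PySem.Str.isIn w text) then 2
  else 3

-- the priority of a list of (already lowered) texts
def pvPriL (texts : List String) : Int :=
  if texts.any (fun t => (["data", "study", "evidence", "measured"] : List String).any (fun w => PySem.Str.isIn w t)) then 0
  else if texts.any (fun t => (["fair", "should", "ought", "value"] : List String).any (fun w => PySem.Str.isIn w t)) then 1
  else if texts.any (fun t => (["because", "therefore", "implies"] : List String).any (fun w => PySem.Str.isIn w t)) then 2
  else 3

lemma pv_inner_fold (text : String) (b : Int) (hb : b ≤ 3) :
    pvKeywordGroups.foldl (fun b p =>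
      if p.1 < b && p.2.any (fun kw => PySem.Str.isIn kw text) then p.1 else b) b
      = min b (pvPri text) := by
  by_cases h0 : (["data", "study", "evidence", "measured"] : List String).any (fun w => PySem.Str.isIn w text) = true <;>
  by_cases h1 : (["fair", "should", "ought", "value"] : List String).any (fun w => PySem.Str.isIn w text) = true <;>
  by_cases h2 : (["because", "therefore", "implies"] : List String).any (fun w => PySem.Str.isIn w text) = true <;>
    simp only [pvKeywordGroups, pvPri, List.foldl_cons, List.foldl_nil, h0, h1, h2,
      Bool.and_true, Bool.and_false, decide_eq_true_eq, Bool.not_eq_true] at * <;>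
    simp only [h0, h1, h2, if_true, if_false, Bool.false_eq_true] <;>
    simp only [min_def] <;> split_ifs <;> omega

lemma pv_pri_cons (t : String) (ts : List String) :
    min (pvPri t) (pvPriL ts) = pvPriL (t :: ts) := by
  cases h0 : (["data", "study", "evidence", "measured"] : List String).any (fun w => PySem.Str.isIn w t) <;>
  cases h1 : (["fair", "should", "ought", "value"] : List String).any (fun w => PySem.Str.isIn w t) <;>
  cases h2 : (["because", "therefore", "implies"] : List String).any (fun w => PySem.Str.isIn w t) <;>
  cases g0 : (ts.any (fun t => (["data", "study", "evidence", "measured"] : List String).any (fun w => PySem.Str.isIn w t))) <;>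
  cases g1 : (ts.any (fun t => (["fair", "should", "ought", "value"] : List String).any (fun w => PySem.Str.isIn w t))) <;>
  cases g2 : (ts.any (fun t => (["because", "therefore", "implies"] : List String).any (fun w => PySem.Str.isIn w t)))
  all_goals
    simp only [List.any_cons, List.any_nil, Bool.or_false] at h0 h1 h2 g0 g1 g2
  all_goals
    simp only [pvPri, pvPriL, List.any_cons, List.any_nil, Bool.or_false, h0, h1, h2, g0, g1, g2,
      Bool.true_or, Bool.false_or, Bool.or_true, if_true, if_false, Bool.false_eq_true, min_def]
  all_goals split_ifs <;> omega

lemma pv_best_eq (own : List (List (String × String))) (b : Int) (hb : b ≤ 3) :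
    (own.foldl (fun best arg =>
      let text := PySem.Str.lower ((PySem.Dict.mk arg).getD "inference_text" "")
      pvKeywordGroups.foldl (fun b p =>
        if p.1 < b && p.2.any (fun kw => PySem.Str.isIn kw text) then p.1 else b) best) b)
      = min b (pvPriL (own.map (fun arg => PySem.Str.lower ((PySem.Dict.mk arg).getD "inference_text" "")))) := by
  induction own generalizing b with
  | nil => simp only [List.foldl_nil, List.map_nil, pvPriL, List.any_nil, Bool.false_eq_true,
      if_false]; omega
  | cons a rest ih =>
    simp only [List.foldl_cons, List.map_cons]
    rw [pv_inner_fold _ b hb, ih _ (le_trans (min_le_left _ _) hb), min_assoc, pv_pri_cons]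

lemma pv_any_or {α} (l : List α) (p q : α → Bool) :
    (l.any fun x => p x || q x) = (l.any p || l.any q) := by
  induction l with
  | nil => simp
  | cons a l ih => simp [ih, Bool.or_assoc, Bool.or_left_comm]

-- ===== VERDICT =====
set_option maxHeartbeats 1000000 in
theorem rebuttal_type_distribution_py_spec : Claim_equal_rebuttal_type_distribution_py := by
  intro own opp _
  unfold Spec_rebuttal_type_distribution_py
  unfold rebuttal_type_distribution_py rebuttal_type_distribution_py_alt
  by_cases he : opp.isEmpty
  · simp [he, pvCategories]
  · simp only [he, Bool.false_eq_true, if_false]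
    rw [pv_best_eq own 3 (by omega)]
    have hj : ∀ w : String, ' ' ∉ w.toList → w.toList ≠ [] →
        (PySem.Str.isIn w (PySem.Str.lower (PySem.Str.join " "
          (own.map (fun arg => (PySem.Dict.mk arg).getD "inference_text" "")))))
        = ((own.map (fun arg => PySem.Str.lower ((PySem.Dict.mk arg).getD "inference_text" ""))).any
            (fun t => PySem.Str.isIn w t)) := by
      intro w hsp hne
      rw [pv_isIn_join w hsp hne]
      simp [List.any_map, Function.comp_def, PySem.Str.toList_lower]
    generalize hT : own.map (fun arg => PySem.Str.lower ((PySem.Dict.mk arg).getD "inference_text" "")) = T at *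
    have c0 : ((["data", "study", "evidence", "measured"] : List String).any fun w =>
        PySem.Str.isIn w (PySem.Str.lower (PySem.Str.join " "
          (own.map (fun arg => (PySem.Dict.mk arg).getD "inference_text" "")))))
        = (T.any fun t => (["data", "study", "evidence", "measured"] : List String).any fun w => PySem.Str.isIn w t) := by
      simp only [List.any_cons, List.any_nil, Bool.or_false,
        hj "data" (by decide) (by decide), hj "study" (by decide) (by decide),
        hj "evidence" (by decide) (by decide), hj "measured" (by decide) (by decide), pv_any_or]
    have c1 : ((["fair", "should", "ought", "value"] : List String).any fun w =>
        PySem.Str.isIn w (PySem.Str.lower (PySem.Str.join " "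
          (own.map (fun arg => (PySem.Dict.mk arg).getD "inference_text" "")))))
        = (T.any fun t => (["fair", "should", "ought", "value"] : List String).any fun w => PySem.Str.isIn w t) := by
      simp only [List.any_cons, List.any_nil, Bool.or_false,
        hj "fair" (by decide) (by decide), hj "should" (by decide) (by decide),
        hj "ought" (by decide) (by decide), hj "value" (by decide) (by decide), pv_any_or]
    have c2 : ((["because", "therefore", "implies"] : List String).any fun w =>
        PySem.Str.isIn w (PySem.Str.lower (PySem.Str.join " "
          (own.map (fun arg => (PySem.Dict.mk arg).getD "inference_text" "")))))
        = (T.any fun t => (["because", "therefore", "implies"] : List String).any fun w => PySem.Str.isIn w t) := by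
      simp only [List.any_cons, List.any_nil, Bool.or_false,
        hj "because" (by decide) (by decide), hj "therefore" (by decide) (by decide),
        hj "implies" (by decide) (by decide), pv_any_or]
    cases m0 : (T.any fun t => (["data", "study", "evidence", "measured"] : List String).any fun w => PySem.Str.isIn w t) <;>
    cases m1 : (T.any fun t => (["fair", "should", "ought", "value"] : List String).any fun w => PySem.Str.isIn w t) <;>
    cases m2 : (T.any fun t => (["because", "therefore", "implies"] : List String).any fun w => PySem.Str.isIn w t) <;>
      rw [m0] at c0 <;> rw [m1] at c1 <;> rw [m2] at c2 <;>
      simp only [c0, c1, c2, pvPriL, m0, m1, m2, if_true, if_false, Bool.false_eq_true] <;>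
      norm_num <;>
      simp [pvCategories, PySem.List.pyGet?, PySem.List.pyIdx?, PySem.Dict.insert, PySem.Dict.getD, PySem.Dict.get?,
        PySem.Dict.contains]
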